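-- pv_equiv track=rewrite | github.com/aisspr/leetcode | GCA/mock1.py | longestSubstringReatingChar
-- ===== SOURCE A (Python) =====
-- def longestSubstringReatingChar(s, k):
--     from collections import defaultdict
--
--     c_cnt = defaultdict(int)
--     max_length = 0
--     left = 0
--     current_l = 0
--
--     for right in range(len(s)):
--         right_c = s[right]
--         c_cnt[right_c] += 1
--
--         while c_cnt[right_c] > k:
--             left_c = s[left]
--             c_cnt[left_c] -= 1
--             left += 1
--         current_l = right - left + 1
--         max_length = max(current_l, max_length)
--     return max_length
-- ===== SOURCE B (Python) =====
-- def longestSubstringReatingChar(s, k):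
--     best = 0
--     n = len(s)
--     for left in range(n):
--         counts = {}
--         for right in range(left, n):
--             c = s[right]
--             counts[c] = counts.get(c, 0) + 1
--             if counts[c] > k:
--                 break
--             if right - left + 1 > best:
--                 best = right - left + 1
--     return best
-- ===== Notes on version B (the rewrite author's own statement) =====
-- stated objective: alternative
-- what changed: Replaced the amortized sliding-window with a counter dict shared across iterations by a brute-force nested scan: for each start index a fresh counter is built while extending right until a character count exceeds k.
import Mathlib
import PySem

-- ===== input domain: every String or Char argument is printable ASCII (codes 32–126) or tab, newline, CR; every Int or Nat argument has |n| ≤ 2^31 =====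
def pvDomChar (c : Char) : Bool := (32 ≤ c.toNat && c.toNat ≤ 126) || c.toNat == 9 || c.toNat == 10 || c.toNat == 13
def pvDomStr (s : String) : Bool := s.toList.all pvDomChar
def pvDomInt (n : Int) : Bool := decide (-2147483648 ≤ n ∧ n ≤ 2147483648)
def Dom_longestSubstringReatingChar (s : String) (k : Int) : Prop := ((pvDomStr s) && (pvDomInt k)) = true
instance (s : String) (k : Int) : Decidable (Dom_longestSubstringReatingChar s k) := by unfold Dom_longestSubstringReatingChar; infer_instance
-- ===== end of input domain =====

-- B replaces A's amortized sliding window (shared counter, moving left pointer) by a brute-force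
-- nested scan with a fresh counter per start index (objective: alternative, not faster).

-- ===== PORT A =====
-- the inner `while c_cnt[right_c] > k:` loop of A; if `s[left]` is out of range the loop stops
-- (Python raises IndexError there — such inputs are outside Pre_)
-- (fuel makes the recursion structural; it is never exhausted on inputs admitted by Pre_)
def pvShrinkA (L : List Char) (k : Int) (rc : Char) :
    Nat → PySem.Dict Char Int → Nat → PySem.Dict Char Int × Nat
  | 0, d, left => (d, left)
  | fuel + 1, d, left =>
    if d.getD rc 0 > k then
      match L[left]? with
      | some lc => pvShrinkA L k rc fuel (d.insert lc (d.getD lc 0 - 1)) (left + 1)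
      | none => (d, left)
    else (d, left)

-- one iteration of A's `for right in range(len(s))` loop; state = (c_cnt, left, max_length)
def pvStepA (L : List Char) (k : Int) (st : PySem.Dict Char Int × Nat × Int) (right : Nat) :
    PySem.Dict Char Int × Nat × Int :=
  match L[right]? with
  | some rc =>
    let d := st.1.insert rc (st.1.getD rc 0 + 1)
    let p := pvShrinkA L k rc (L.length + 1) d st.2.1
    let curl : Int := (right : Int) - (p.2 : Int) + 1
    (p.1, p.2, max curl st.2.2)
  | none => st  -- unreachable: right < len(s)

def longestSubstringReatingChar (s : String) (k : Int) : Int :=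
  ((List.range s.toList.length).foldl (pvStepA s.toList k) (PySem.Dict.empty, 0, 0)).2.2

-- ===== PORT B =====
-- B's inner `for right in range(left, n)` loop with its `break`
def pvInnerB (L : List Char) (k : Int) (left : Nat) :
    Nat → Nat → PySem.Dict Char Int → Int → Int
  | 0, _, _, best => best
  | fuel + 1, right, counts, best =>
    if h : right < L.length then
      let c := L[right]
      let counts := counts.insert c (counts.getD c 0 + 1)
      if counts.getD c 0 > k then best
      else pvInnerB L k left fuel (right + 1) counts
        (if (right : Int) - (left : Int) + 1 > best then (right : Int) - (left : Int) + 1 else best)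
    else best

def longestSubstringReatingChar_alt (s : String) (k : Int) : Int :=
  (List.range s.toList.length).foldl
    (fun best left => pvInnerB s.toList k left (s.toList.length + 1) left PySem.Dict.empty best) 0

-- ===== PRECONDITION & SPEC =====
-- Pre_ excludes k < 0 with non-empty s: there A's shrinking loop runs `left` past the end of the
-- string and raises IndexError (on every other input A returns normally).
def Pre_longestSubstringReatingChar (s : String) (k : Int) : Prop := 0 ≤ k ∨ s = ""
instance (s : String) (k : Int) : Decidable (Pre_longestSubstringReatingChar s k) := by
  unfold Pre_longestSubstringReatingChar; infer_instance

def pvWitness_longestSubstringReatingChar : String × Int := ("abcab", 2)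

def Spec_longestSubstringReatingChar (s : String) (k : Int) (out : Int) : Prop :=
  out = longestSubstringReatingChar_alt s k
instance (s : String) (k : Int) (out : Int) :
    Decidable (Spec_longestSubstringReatingChar s k out) := by
  unfold Spec_longestSubstringReatingChar; infer_instance

-- ===== CLAIM (what is proved, stated in full; the proofs are below) =====
def Claim_equal_longestSubstringReatingChar : Prop := ∀ (s : String) (k : Int),
  Dom_longestSubstringReatingChar s k → Pre_longestSubstringReatingChar s k →
  Spec_longestSubstringReatingChar s k (longestSubstringReatingChar s k)

-- ===== LEMMAS AND PROOFS =====

-- window s[l:r] of the character list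
def pvWin (L : List Char) (l r : Nat) : List Char := (L.drop l).take (r - l)

-- "every character occurs at most k times in w"
def pvOk (k : Int) (w : List Char) : Prop := ∀ c : Char, ((w.count c : Int)) ≤ k

lemma pvWin_self (L : List Char) (l : Nat) : pvWin L l l = [] := by
  simp [pvWin]

lemma pvWin_succ_right (L : List Char) {l m : Nat} (h1 : l ≤ m) (h2 : m < L.length) :
    pvWin L l (m + 1) = pvWin L l m ++ [L[m]] := by
  have h3 : m + 1 - l = (m - l) + 1 := by omega
  have h4 : l + (m - l) = m := by omega
  rw [pvWin, pvWin, h3, List.take_add_one, List.getElem?_drop, h4,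
    List.getElem?_eq_getElem h2]
  rfl

lemma pvWin_cons (L : List Char) {l r : Nat} (h1 : l < r) (h2 : l < L.length) :
    pvWin L l r = L[l] :: pvWin L (l + 1) r := by
  have h3 : r - l = (r - (l + 1)) + 1 := by omega
  rw [pvWin, pvWin, List.drop_eq_getElem_cons h2, h3, List.take_succ_cons]

lemma pvWin_sublist (L : List Char) {l l' r r' : Nat} (hl : l ≤ l') (hr : r ≤ r') :
    List.Sublist (pvWin L l' r) (pvWin L l r') := by
  by_cases hc : l' ≤ r'
  · have s1 : List.Sublist (pvWin L l' r) (pvWin L l' r') := by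
      have he : pvWin L l' r = (pvWin L l' r').take (r - l') := by
        rw [pvWin, pvWin, List.take_take]
        congr 1
        omega
      rw [he]
      exact List.take_sublist _ _
    have s2 : List.Sublist (pvWin L l' r') (pvWin L l r') := by
      have h1 : L.drop l' = (L.drop l).drop (l' - l) := by
        rw [List.drop_drop]
        congr 1
        omega
      have h2 : pvWin L l' r' = ((L.drop l).take (r' - l)).drop (l' - l) := by
        rw [pvWin, h1, List.drop_take]
        congr 1
        omega
      rw [h2, pvWin]
      exact List.drop_sublist _ _
    exact s1.trans s2
  · have he : pvWin L l' r = [] := by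
      have h0 : r - l' = 0 := by omega
      rw [pvWin, h0]
      rfl
    rw [he]
    exact List.nil_sublist _

lemma pvOk_sublist {k : Int} {w w' : List Char} (h : List.Sublist w' w) (hw : pvOk k w) :
    pvOk k w' := by
  intro c
  exact le_trans (by exact_mod_cast h.count_le c) (hw c)

lemma pvOk_nil {k : Int} (hk : 0 ≤ k) : pvOk k [] := by
  intro c
  simpa using hk

-- generic loop invariant for a foldl over `range n`
lemma pvFoldlRangeInv {α : Type} (f : α → Nat → α) (P : Nat → α → Prop) :
    ∀ (n : Nat) (init : α), P 0 init → (∀ m a, m < n → P m a → P (m + 1) (f a m)) →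
      P n ((List.range n).foldl f init) := by
  intro n
  induction n with
  | zero => intro init h0 _; simpa using h0
  | succ n ih =>
    intro init h0 hs
    rw [List.range_succ, List.foldl_append]
    exact hs n _ (by omega) (ih init h0 (fun m a hm => hs m a (by omega)))

-- specification of A's while loop
lemma pvShrinkA_spec (L : List Char) (k : Int) (hk : 0 ≤ k) (rc : Char) (m : Nat)
    (hm : m < L.length) :
    ∀ (fuel left : Nat) (d : PySem.Dict Char Int), m + 1 - left ≤ fuel → left ≤ m + 1 →
      (∀ c, d.getD c 0 = ((pvWin L left (m + 1)).count c : Int)) →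
      (∀ c, c ≠ rc → ((pvWin L left (m + 1)).count c : Int) ≤ k) →
      (∀ l', l' < left → ¬ pvOk k (pvWin L l' (m + 1))) →
      left ≤ (pvShrinkA L k rc fuel d left).2 ∧
      (pvShrinkA L k rc fuel d left).2 ≤ m + 1 ∧
      (∀ c, (pvShrinkA L k rc fuel d left).1.getD c 0 =
        ((pvWin L (pvShrinkA L k rc fuel d left).2 (m + 1)).count c : Int)) ∧
      pvOk k (pvWin L (pvShrinkA L k rc fuel d left).2 (m + 1)) ∧
      (∀ l', l' < (pvShrinkA L k rc fuel d left).2 → ¬ pvOk k (pvWin L l' (m + 1))) := by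
  intro fuel
  induction fuel with
  | zero =>
    intro left d hfuel hle hcnt hother hmin
    have hl : left = m + 1 := by omega
    subst hl
    simp only [pvShrinkA]
    refine ⟨le_refl _, le_refl _, hcnt, ?_, hmin⟩
    rw [pvWin_self]
    exact pvOk_nil hk
  | succ fuel ih =>
    intro left d hfuel hle hcnt hother hmin
    simp only [pvShrinkA]
    by_cases hcond : d.getD rc 0 > k
    · rw [if_pos hcond]
      have hlm : left ≤ m := by
        by_contra hcon
        have hl : left = m + 1 := by omega
        subst hl
        rw [hcnt rc, pvWin_self] at hcond
        simp at hcond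
        omega
      have hlt : left < L.length := by omega
      have hget : L[left]? = some L[left] := List.getElem?_eq_getElem hlt
      simp only [hget]
      have hconsw : pvWin L left (m + 1) = L[left] :: pvWin L (left + 1) (m + 1) :=
        pvWin_cons L (by omega) hlt
      have hnotok : ¬ pvOk k (pvWin L left (m + 1)) := by
        intro hokk
        have := hokk rc
        rw [← hcnt rc] at this
        omega
      have hc1 : ∀ c, (d.insert L[left] (d.getD L[left] 0 - 1)).getD c 0 =
          ((pvWin L (left + 1) (m + 1)).count c : Int) := by
        intro c
        rw [PySem.Dict.getD_insert]
        by_cases hc : c = L[left]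
        · rw [if_pos hc, hc, hcnt]
          rw [hconsw, List.count_cons_self]
          push_cast
          ring
        · rw [if_neg hc, hcnt, hconsw, List.count_cons]
          simp [Ne.symm hc]
      have hc2 : ∀ c, c ≠ rc → ((pvWin L (left + 1) (m + 1)).count c : Int) ≤ k := by
        intro c hc
        have hmono : (pvWin L (left + 1) (m + 1)).count c ≤ (pvWin L left (m + 1)).count c := by
          rw [hconsw, List.count_cons]
          omega
        exact le_trans (by exact_mod_cast hmono) (hother c hc)
      have hc3 : ∀ l', l' < left + 1 → ¬ pvOk k (pvWin L l' (m + 1)) := by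
        intro l' hl'
        rcases Nat.lt_or_ge l' left with h | h
        · exact hmin l' h
        · have : l' = left := by omega
          rw [this]
          exact hnotok
      obtain ⟨r1, r2, r3, r4, r5⟩ := ih (left + 1) (d.insert L[left] (d.getD L[left] 0 - 1))
        (by omega) (by omega) hc1 hc2 hc3
      exact ⟨by omega, r2, r3, r4, r5⟩
    · rw [if_neg hcond]
      refine ⟨le_refl _, hle, hcnt, ?_, hmin⟩
      intro c
      by_cases hc : c = rc
      · rw [hc, ← hcnt rc]
        omega
      · exact hother c hc

-- invariant of A's main loop
def pvInvA (L : List Char) (k : Int) (m : Nat) (st : PySem.Dict Char Int × Nat × Int) : Prop :=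
  st.2.1 ≤ m ∧
  (∀ c, st.1.getD c 0 = ((pvWin L st.2.1 m).count c : Int)) ∧
  pvOk k (pvWin L st.2.1 m) ∧
  (∀ l', l' < st.2.1 → ¬ pvOk k (pvWin L l' m)) ∧
  (∃ l r, l ≤ r ∧ r ≤ m ∧ pvOk k (pvWin L l r) ∧ st.2.2 = (r : Int) - (l : Int)) ∧
  (∀ l r, l ≤ r → r ≤ m → pvOk k (pvWin L l r) → ((r : Int) - (l : Int)) ≤ st.2.2)

lemma pvStepA_inv (L : List Char) (k : Int) (hk : 0 ≤ k) (m : Nat) (hm : m < L.length)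
    (st : PySem.Dict Char Int × Nat × Int) (h : pvInvA L k m st) :
    pvInvA L k (m + 1) (pvStepA L k st m) := by
  obtain ⟨d, left, maxl⟩ := st
  obtain ⟨hle, hcnt, hok, hmin, hach, hdom⟩ := h
  simp only at hle hcnt hok hmin hach hdom
  have hget : L[m]? = some L[m] := List.getElem?_eq_getElem hm
  have hsucc : pvWin L left (m + 1) = pvWin L left m ++ [L[m]] := pvWin_succ_right L hle hm
  have hcnt1 : ∀ c, (d.insert L[m] (d.getD L[m] 0 + 1)).getD c 0 =
      ((pvWin L left (m + 1)).count c : Int) := by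
    intro c
    rw [PySem.Dict.getD_insert, hsucc, List.count_append]
    by_cases hc : c = L[m]
    · rw [if_pos hc, hcnt, hc]
      simp
    · rw [if_neg hc, hcnt]
      have : ([L[m]].count c) = 0 := by
        simp [List.count_singleton]
        exact fun hcc => hc hcc.symm
      rw [this]
      push_cast
      ring
  have hother1 : ∀ c, c ≠ L[m] → ((pvWin L left (m + 1)).count c : Int) ≤ k := by
    intro c hc
    rw [hsucc, List.count_append]
    have : ([L[m]].count c) = 0 := by
      simp [List.count_singleton]
      exact fun hcc => hc hcc.symm
    rw [this]
    simpa using hok c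
  have hmin1 : ∀ l', l' < left → ¬ pvOk k (pvWin L l' (m + 1)) := by
    intro l' hl' hokk
    exact hmin l' hl' (pvOk_sublist (pvWin_sublist L (le_refl l') (by omega)) hokk)
  obtain ⟨s1, s2, s3, s4, s5⟩ := pvShrinkA_spec L k hk L[m] m hm (L.length + 1) left
    (d.insert L[m] (d.getD L[m] 0 + 1)) (by omega) (by omega) hcnt1 hother1 hmin1
  simp only [pvStepA, hget]
  set p := pvShrinkA L k L[m] (L.length + 1) (d.insert L[m] (d.getD L[m] 0 + 1)) left with hp
  refine ⟨s2, s3, s4, s5, ?_, ?_⟩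
  · rcases max_choice ((m : Int) - (p.2 : Int) + 1) maxl with hmx | hmx
    · rw [hmx]
      exact ⟨p.2, m + 1, by omega, le_refl _, s4, by push_cast; ring⟩
    · rw [hmx]
      obtain ⟨l, r, h1, h2, h3, h4⟩ := hach
      exact ⟨l, r, h1, by omega, h3, h4⟩
  · intro l r h1 h2 h3
    rcases Nat.lt_or_ge r (m + 1) with hr | hr
    · have : ((r : Int) - (l : Int)) ≤ maxl := hdom l r h1 (by omega) h3
      exact le_trans this (le_max_right _ _)
    · have hrm : r = m + 1 := by omega
      subst hrm
      have hlp : p.2 ≤ l := by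
        by_contra hcon
        exact s5 l (by omega) h3
      have : ((m + 1 : Nat) : Int) - (l : Int) ≤ (m : Int) - (p.2 : Int) + 1 := by
        have : (p.2 : Int) ≤ (l : Int) := by exact_mod_cast hlp
        push_cast
        omega
      exact le_trans this (le_max_left _ _)

-- specification of B's inner loop
lemma pvInnerB_spec (L : List Char) (k : Int) (_hk : 0 ≤ k) (left : Nat) :
    ∀ (fuel right : Nat) (counts : PySem.Dict Char Int) (best : Int),
      L.length - right ≤ fuel →
      left ≤ right → right ≤ L.length →
      (∀ c, counts.getD c 0 = ((pvWin L left right).count c : Int)) →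
      pvOk k (pvWin L left right) →
      ((right : Int) - (left : Int) ≤ best) →
      best ≤ pvInnerB L k left fuel right counts best ∧
      (pvInnerB L k left fuel right counts best = best ∨
        ∃ r, left ≤ r ∧ r ≤ L.length ∧ pvOk k (pvWin L left r) ∧
          pvInnerB L k left fuel right counts best = (r : Int) - (left : Int)) ∧
      (∀ r, left ≤ r → r ≤ L.length → pvOk k (pvWin L left r) →
        (r : Int) - (left : Int) ≤ pvInnerB L k left fuel right counts best) := by
  intro fuel
  induction fuel with
  | zero =>
    intro right counts best hfuel hlr hrn hcnt hok hbest
    have hr : right = L.length := by omega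
    refine ⟨le_refl _, Or.inl rfl, ?_⟩
    intro r h1 h2 _
    show (r : Int) - (left : Int) ≤ best
    have : (r : Int) ≤ (right : Int) := by exact_mod_cast (by omega : r ≤ right)
    omega
  | succ fuel ih =>
    intro right counts best hfuel hlr hrn hcnt hok hbest
    simp only [pvInnerB]
    by_cases h : right < L.length
    · rw [dif_pos h]
      have hsucc : pvWin L left (right + 1) = pvWin L left right ++ [L[right]] :=
        pvWin_succ_right L hlr h
      have hcntc : (counts.insert L[right] (counts.getD L[right] 0 + 1)).getD L[right] 0 =
          ((pvWin L left right).count L[right] : Int) + 1 := by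
        rw [PySem.Dict.getD_insert, if_pos rfl, hcnt]
      by_cases hcond : (counts.insert L[right] (counts.getD L[right] 0 + 1)).getD L[right] 0 > k
      · rw [if_pos hcond]
        refine ⟨le_refl _, Or.inl rfl, ?_⟩
        intro r h1 h2 h3
        rcases Nat.lt_or_ge r (right + 1) with hr | hr
        · have : (r : Int) ≤ (right : Int) := by exact_mod_cast (by omega : r ≤ right)
          omega
        · exfalso
          have hok1 : pvOk k (pvWin L left (right + 1)) :=
            pvOk_sublist (pvWin_sublist L (le_refl left) hr) h3
          have := hok1 L[right]
          rw [hsucc, List.count_append, List.count_singleton] at this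
          rw [hcntc] at hcond
          push_cast at this
          simp at this
          omega
      · rw [if_neg hcond]
        have hok1 : pvOk k (pvWin L left (right + 1)) := by
          intro c
          rw [hsucc, List.count_append]
          by_cases hc : c = L[right]
          · subst hc
            rw [hcntc] at hcond
            rw [List.count_singleton]
            push_cast
            simp
            omega
          · have : ([L[right]].count c) = 0 := by
              simp [List.count_singleton]
              exact fun hcc => hc hcc.symm
            rw [this]
            simpa using hok c
        have hcnt1 : ∀ c, (counts.insert L[right] (counts.getD L[right] 0 + 1)).getD c 0 =
            ((pvWin L left (right + 1)).count c : Int) := by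
          intro c
          rw [PySem.Dict.getD_insert, hsucc, List.count_append]
          by_cases hc : c = L[right]
          · rw [if_pos hc, hcnt, hc]
            simp
          · rw [if_neg hc, hcnt]
            have : ([L[right]].count c) = 0 := by
              simp [List.count_singleton]
              exact fun hcc => hc hcc.symm
            rw [this]
            push_cast
            ring
        set best' : Int := if (right : Int) - (left : Int) + 1 > best then
          (right : Int) - (left : Int) + 1 else best with hbest'
        have hb1 : best ≤ best' := by
          rw [hbest']
          split <;> omega
        have hb2 : ((right + 1 : Nat) : Int) - (left : Int) ≤ best' := by
          rw [hbest']
          push_cast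
          split <;> omega
        obtain ⟨i1, i2, i3⟩ := ih (right + 1)
          (counts.insert L[right] (counts.getD L[right] 0 + 1)) best' (by omega) (by omega)
          (by omega) hcnt1 hok1 hb2
        refine ⟨le_trans hb1 i1, ?_, i3⟩
        rcases i2 with he | ⟨r, hr1, hr2, hr3, hr4⟩
        · rw [he, hbest']
          by_cases hb : (right : Int) - (left : Int) + 1 > best
          · rw [if_pos hb]
            exact Or.inr ⟨right + 1, by omega, by omega, hok1, by push_cast; ring⟩
          · rw [if_neg hb]
            exact Or.inl rfl
        · exact Or.inr ⟨r, hr1, hr2, hr3, hr4⟩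
    · rw [dif_neg h]
      have hr : right = L.length := by omega
      refine ⟨le_refl _, Or.inl rfl, ?_⟩
      intro r h1 h2 _
      have : (r : Int) ≤ (right : Int) := by exact_mod_cast (by omega : r ≤ right)
      omega

-- invariant of B's outer loop
def pvInvB (L : List Char) (k : Int) (m : Nat) (best : Int) : Prop :=
  0 ≤ best ∧
  (∃ l r, l ≤ r ∧ r ≤ L.length ∧ pvOk k (pvWin L l r) ∧ best = (r : Int) - (l : Int)) ∧
  (∀ l r, l < m → l ≤ r → r ≤ L.length → pvOk k (pvWin L l r) →
    ((r : Int) - (l : Int)) ≤ best)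

lemma pvStepB_inv (L : List Char) (k : Int) (hk : 0 ≤ k) (m : Nat) (hm : m < L.length)
    (best : Int) (h : pvInvB L k m best) :
    pvInvB L k (m + 1) (pvInnerB L k m (L.length + 1) m PySem.Dict.empty best) := by
  obtain ⟨h0, hach, hdom⟩ := h
  obtain ⟨i1, i2, i3⟩ := pvInnerB_spec L k hk m (L.length + 1) m PySem.Dict.empty best
    (by omega) (le_refl m) (by omega)
    (by intro c; rw [pvWin_self]; simp)
    (by rw [pvWin_self]; exact pvOk_nil hk)
    (by omega)
  refine ⟨le_trans h0 i1, ?_, ?_⟩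
  · rcases i2 with he | ⟨r, hr1, hr2, hr3, hr4⟩
    · rw [he]
      exact hach
    · exact ⟨m, r, hr1, hr2, hr3, hr4⟩
  · intro l r hlm hlr hrn hok
    rcases Nat.lt_or_ge l m with hl | hl
    · exact le_trans (hdom l r hl hlr hrn hok) i1
    · have : l = m := by omega
      subst this
      exact i3 r hlr hrn hok

lemma pvInvA_base (L : List Char) (k : Int) (hk : 0 ≤ k) :
    pvInvA L k 0 (PySem.Dict.empty, 0, 0) := by
  refine ⟨le_refl 0, ?_, ?_, ?_, ⟨0, 0, le_refl 0, le_refl 0, ?_, by norm_num⟩, ?_⟩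
  · intro c
    rw [pvWin_self]
    simp
  · rw [pvWin_self]
    exact pvOk_nil hk
  · intro l' h
    exact absurd h (Nat.not_lt_zero l')
  · rw [pvWin_self]
    exact pvOk_nil hk
  · intro l r h1 h2 _
    have hl : l = 0 := by omega
    have hr : r = 0 := by omega
    subst hl
    subst hr
    norm_num

lemma pvInvB_base (L : List Char) (k : Int) (hk : 0 ≤ k) : pvInvB L k 0 0 := by
  refine ⟨le_refl 0, ⟨0, 0, le_refl 0, by omega, ?_, by norm_num⟩, ?_⟩
  · rw [pvWin_self]
    exact pvOk_nil hk
  · intro l r hlm _ _ _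
    exact absurd hlm (Nat.not_lt_zero l)

-- ===== VERDICT (by name: the statement is the Claim_ definition above) =====
theorem longestSubstringReatingChar_spec : Claim_equal_longestSubstringReatingChar := by
  intro s k hdom hpre
  unfold Spec_longestSubstringReatingChar
  rcases hpre with hk | hs
  · unfold longestSubstringReatingChar longestSubstringReatingChar_alt
    set L := s.toList with hL
    have hA := pvFoldlRangeInv (pvStepA L k) (pvInvA L k) L.length (PySem.Dict.empty, 0, 0)
      (pvInvA_base L k hk) (fun m a hm ha => pvStepA_inv L k hk m hm a ha)
    have hB := pvFoldlRangeInv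
      (fun best left => pvInnerB L k left (L.length + 1) left PySem.Dict.empty best)
      (pvInvB L k) L.length 0 (pvInvB_base L k hk)
      (fun m a hm ha => pvStepB_inv L k hk m hm a ha)
    obtain ⟨-, -, -, -, ⟨la, ra, hla, hra, hoka, hva⟩, hdomA⟩ := hA
    obtain ⟨hb0, ⟨lb, rb, hlb, hrb, hokb, hvb⟩, hdomB⟩ := hB
    apply le_antisymm
    · rw [hva]
      rcases Nat.lt_or_ge la L.length with hlan | hlan
      · exact hdomB la ra hlan hla hra hoka
      · have h1 : la = L.length := by omega
        have h2 : ra = la := by omega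
        subst h2
        simpa using hb0
    · rw [hvb]
      exact hdomA lb rb hlb hrb hokb
  · subst hs
    rfl
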